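-- pv_equiv track=rewrite | github.com/Thiago-Santos-SI/python-tst | 10/Q2.py | alocacao_aulas
-- ===== SOURCE A (Python) =====
-- def alocacao_aulas(alunos):
--     wik = []
--     dal = []
--     jor = []
--     for i in alunos:
--         if i[1] == 1 or i[1] == 2 or i[1] == 3:
--             wik.append(i[0])
--         elif i[1] == 4 or i[1] == 5 or i[1] == 6:
--             dal.append(i[0])
--         elif i[1] == 7 or i[1] == 8 or i[1] == 9 or i[1] == 10:
--             jor.append(i[0])
--
--     list = [wik, dal, jor]
--     return list
-- ===== SOURCE B (Python) =====
-- def alocacao_aulas(alunos):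
--     return [[nome for nome, nivel in alunos if 1 <= nivel <= 3],
--             [nome for nome, nivel in alunos if 4 <= nivel <= 6],
--             [nome for nome, nivel in alunos if 7 <= nivel <= 10]]
-- ===== Notes on version B (the rewrite author's own statement) =====
-- stated objective: simpler
-- what changed: Replaces the single accumulating loop with three equality chains by three filtering comprehensions over arithmetic range conditions, one per bucket.
import Mathlib
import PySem

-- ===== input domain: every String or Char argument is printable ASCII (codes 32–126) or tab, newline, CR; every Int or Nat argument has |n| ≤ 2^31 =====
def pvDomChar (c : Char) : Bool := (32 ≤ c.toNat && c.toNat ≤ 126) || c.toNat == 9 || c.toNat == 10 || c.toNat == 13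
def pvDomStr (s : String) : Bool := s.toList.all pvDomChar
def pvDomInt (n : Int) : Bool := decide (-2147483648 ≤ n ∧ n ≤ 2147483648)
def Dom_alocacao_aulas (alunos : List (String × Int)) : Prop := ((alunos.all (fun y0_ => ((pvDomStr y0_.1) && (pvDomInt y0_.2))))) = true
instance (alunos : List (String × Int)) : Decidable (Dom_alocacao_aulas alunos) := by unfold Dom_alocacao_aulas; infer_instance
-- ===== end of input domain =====

-- B replaces A's single accumulating loop with three range-test filtering passes (simpler decomposition).

-- ===== PORT A =====
-- literal port of A's loop: one fold carrying the three accumulators (wik, dal, jor)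
def alocacao_aulas (alunos : List (String × Int)) : List (List String) :=
  let s := alunos.foldl
    (fun (st : List String × List String × List String) i =>
      if i.2 == 1 || i.2 == 2 || i.2 == 3 then (st.1 ++ [i.1], st.2.1, st.2.2)
      else if i.2 == 4 || i.2 == 5 || i.2 == 6 then (st.1, st.2.1 ++ [i.1], st.2.2)
      else if i.2 == 7 || i.2 == 8 || i.2 == 9 || i.2 == 10 then (st.1, st.2.1, st.2.2 ++ [i.1])
      else st)
    ([], [], [])
  [s.1, s.2.1, s.2.2]

-- ===== PORT B =====
-- literal port of Source B: three filtering comprehensions with range conditions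
def alocacao_aulas_alt (alunos : List (String × Int)) : List (List String) :=
  [(alunos.filter (fun i => 1 ≤ i.2 && i.2 ≤ 3)).map Prod.fst,
   (alunos.filter (fun i => 4 ≤ i.2 && i.2 ≤ 6)).map Prod.fst,
   (alunos.filter (fun i => 7 ≤ i.2 && i.2 ≤ 10)).map Prod.fst]

-- ===== PRECONDITION & SPEC =====
def Spec_alocacao_aulas (alunos : List (String × Int)) (out : List (List String)) : Prop := out = alocacao_aulas_alt alunos
instance (alunos : List (String × Int)) (out : List (List String)) : Decidable (Spec_alocacao_aulas alunos out) := by unfold Spec_alocacao_aulas; infer_instance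

-- ===== CLAIM (what is proved, stated in full; the proofs are below) =====
def Claim_equal_alocacao_aulas : Prop := ∀ (alunos : List (String × Int)), Dom_alocacao_aulas alunos → Spec_alocacao_aulas alunos (alocacao_aulas alunos)

-- ===== LEMMAS AND PROOFS =====

lemma alocacao_loop (alunos : List (String × Int)) (a b c : List String) :
    alunos.foldl
      (fun (st : List String × List String × List String) i =>
        if i.2 == 1 || i.2 == 2 || i.2 == 3 then (st.1 ++ [i.1], st.2.1, st.2.2)
        else if i.2 == 4 || i.2 == 5 || i.2 == 6 then (st.1, st.2.1 ++ [i.1], st.2.2)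
        else if i.2 == 7 || i.2 == 8 || i.2 == 9 || i.2 == 10 then (st.1, st.2.1, st.2.2 ++ [i.1])
        else st)
      (a, b, c)
    = (a ++ (alunos.filter (fun i => 1 ≤ i.2 && i.2 ≤ 3)).map Prod.fst,
       b ++ (alunos.filter (fun i => 4 ≤ i.2 && i.2 ≤ 6)).map Prod.fst,
       c ++ (alunos.filter (fun i => 7 ≤ i.2 && i.2 ≤ 10)).map Prod.fst) := by
  induction alunos generalizing a b c with
  | nil => simp
  | cons hd tl ih =>
    obtain ⟨n, v⟩ := hd
    simp only [List.foldl_cons, List.filter_cons]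
    by_cases h1 : 1 ≤ v ∧ v ≤ 3
    · have : (v == 1 || v == 2 || v == 3) = true := by
        rcases h1 with ⟨hl, hr⟩; interval_cases v <;> decide
      simp only [this, if_true, ih]
      have : (decide (1 ≤ v) && decide (v ≤ 3)) = true := by simp [h1.1, h1.2]
      have h2 : (decide (4 ≤ v) && decide (v ≤ 6)) = false := by
        simp only [Bool.and_eq_false_iff, decide_eq_false_iff_not]; omega
      have h3 : (decide (7 ≤ v) && decide (v ≤ 10)) = false := by
        simp only [Bool.and_eq_false_iff, decide_eq_false_iff_not]; omega
      simp [this, h2, h3]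
    · by_cases h2 : 4 ≤ v ∧ v ≤ 6
      · have e1 : (v == 1 || v == 2 || v == 3) = false := by
          simp only [Bool.or_eq_false_iff, beq_eq_false_iff_ne, ne_eq]; omega
        have e2 : (v == 4 || v == 5 || v == 6) = true := by
          rcases h2 with ⟨hl, hr⟩; interval_cases v <;> decide
        simp only [e1, e2, if_true, ih]
        have f1 : (decide (1 ≤ v) && decide (v ≤ 3)) = false := by
          simp only [Bool.and_eq_false_iff, decide_eq_false_iff_not]; omega
        have f2 : (decide (4 ≤ v) && decide (v ≤ 6)) = true := by simp [h2.1, h2.2]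
        have f3 : (decide (7 ≤ v) && decide (v ≤ 10)) = false := by
          simp only [Bool.and_eq_false_iff, decide_eq_false_iff_not]; omega
        simp [f1, f2, f3]
      · by_cases h3 : 7 ≤ v ∧ v ≤ 10
        · have e1 : (v == 1 || v == 2 || v == 3) = false := by
            simp only [Bool.or_eq_false_iff, beq_eq_false_iff_ne, ne_eq]; omega
          have e2 : (v == 4 || v == 5 || v == 6) = false := by
            simp only [Bool.or_eq_false_iff, beq_eq_false_iff_ne, ne_eq]; omega
          have e3 : (v == 7 || v == 8 || v == 9 || v == 10) = true := by
            rcases h3 with ⟨hl, hr⟩; interval_cases v <;> decide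
          simp only [e1, e2, e3, if_true, ih]
          have f1 : (decide (1 ≤ v) && decide (v ≤ 3)) = false := by
            simp only [Bool.and_eq_false_iff, decide_eq_false_iff_not]; omega
          have f2 : (decide (4 ≤ v) && decide (v ≤ 6)) = false := by
            simp only [Bool.and_eq_false_iff, decide_eq_false_iff_not]; omega
          have f3 : (decide (7 ≤ v) && decide (v ≤ 10)) = true := by simp [h3.1, h3.2]
          simp [f1, f2, f3]
        · have e1 : (v == 1 || v == 2 || v == 3) = false := by
            simp only [Bool.or_eq_false_iff, beq_eq_false_iff_ne, ne_eq]; omega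
          have e2 : (v == 4 || v == 5 || v == 6) = false := by
            simp only [Bool.or_eq_false_iff, beq_eq_false_iff_ne, ne_eq]; omega
          have e3 : (v == 7 || v == 8 || v == 9 || v == 10) = false := by
            simp only [Bool.or_eq_false_iff, beq_eq_false_iff_ne, ne_eq]; omega
          simp only [e1, e2, e3, ih]
          have f1 : (decide (1 ≤ v) && decide (v ≤ 3)) = false := by
            simp only [Bool.and_eq_false_iff, decide_eq_false_iff_not]; omega
          have f2 : (decide (4 ≤ v) && decide (v ≤ 6)) = false := by
            simp only [Bool.and_eq_false_iff, decide_eq_false_iff_not]; omega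
          have f3 : (decide (7 ≤ v) && decide (v ≤ 10)) = false := by
            simp only [Bool.and_eq_false_iff, decide_eq_false_iff_not]; omega
          simp [f1, f2, f3]

-- ===== VERDICT (by name: the statement is the Claim_ definition above) =====
theorem alocacao_aulas_spec : Claim_equal_alocacao_aulas := by
  intro alunos _
  unfold Spec_alocacao_aulas alocacao_aulas alocacao_aulas_alt
  simp only [alocacao_loop]
  simp
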